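-- pv_equiv track=rewrite | github.com/n7tms/AOC | AOC2023/202304.py | adjacent_part_number_upl
-- ===== SOURCE A (Python) =====
-- def get_whole_number(data,row,col) -> int:
--     number = []
--
--     # look left
--     c = col
--     while data[row][c].isdigit() and c >= 0:
--         number.insert(0,data[row][c])
--         c -= 1
--
--     # look right
--     c = col + 1
--     while c < len(data[row]) and data[row][c].isdigit():
--         number.append(data[row][c])
--         c += 1
--
--     return int("".join(number))
--
-- def adjacent_part_number_upl(data,row,col) -> int:
--     DIRS = ([-1,-1],[0,-1],[-1,0],[-1,1])
--     for d in DIRS: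
--         r = row + d[0]
--         c = col + d[1]
--         if data[r][c].isdigit():
--             return get_whole_number(data,r,c)
--
--     return 0
-- ===== SOURCE B (Python) =====
-- def adjacent_part_number_upl(data, row, col) -> int:
--     for dr, dc in ((-1, -1), (0, -1), (-1, 0), (-1, 1)):
--         s = data[row + dr]
--         c = col + dc
--         if s[c].isdigit():
--             # one forward pass over the row: every maximal digit run as (start, end, value)
--             runs = []
--             start, val = None, 0
--             for i, x in enumerate(s):
--                 if x.isdigit():
--                     if start is None:
--                         start = i
--                     val = val * 10 + (ord(x) - 48)
--                 else:
--                     if start is not None: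
--                         runs.append((start, i, val))
--                         start, val = None, 0
--             if start is not None:
--                 runs.append((start, len(s), val))
--             return next(v for st, en, v in runs if st <= c < en)
--     return 0
-- ===== Notes on version B (the rewrite author's own statement) =====
-- stated objective: alternative
-- what changed: Number extraction is rebuilt: instead of A's two outward character-accumulation loops from the probed cell followed by int() on the joined chars, B makes one forward pass over the row collecting every maximal digit run as a (start, end, value) triple with the value accumulated arithmetically, and returns the value of the run whose span contains the probed column.
-- outside the precondition, e.g. on adjacent_part_number_upl(['12a34'], 1, 0): A returns 12, B raises StopIteration; on adjacent_part_number_upl(['a3'], 1, 0): A raises ValueError, B raises StopIteration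
import Mathlib
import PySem

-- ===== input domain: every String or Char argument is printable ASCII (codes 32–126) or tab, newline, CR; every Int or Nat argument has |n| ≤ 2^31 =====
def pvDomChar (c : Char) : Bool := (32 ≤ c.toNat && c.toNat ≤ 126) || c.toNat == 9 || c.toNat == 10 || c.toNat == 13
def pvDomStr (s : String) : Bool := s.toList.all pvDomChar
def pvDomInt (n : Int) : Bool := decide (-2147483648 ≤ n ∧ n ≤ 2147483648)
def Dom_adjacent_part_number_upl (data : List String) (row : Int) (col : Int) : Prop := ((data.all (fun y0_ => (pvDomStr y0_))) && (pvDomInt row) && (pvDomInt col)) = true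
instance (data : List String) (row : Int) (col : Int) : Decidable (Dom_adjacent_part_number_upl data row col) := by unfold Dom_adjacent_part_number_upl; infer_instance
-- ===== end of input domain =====

-- B rebuilds the number extraction as one forward pass over the row collecting all maximal
-- digit runs (start, end, value) and selecting the run containing the probed column
-- (objective: alternative decomposition, same cost).

-- ===== PORT A =====

-- data[r] as a char list (a 'none' read yields "" junk; Pre_ excludes raising reads)
def pvRowChars (data : List String) (r : Int) : List Char :=
  ((PySem.List.pyGet? data r).getD "").toList

-- data[r][c].isdigit() (negative index from the end, as in Python); none = IndexError
def pvDigitProbe (data : List String) (r c : Int) : Option Bool :=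
  (PySem.List.pyGet? data r).bind fun s => (PySem.List.pyGet? s.toList c).map Char.isDigit

-- int("".join(number)) ported by hand as the plain decimal read: exact for the nonempty
-- digit-only char lists get_whole_number joins (the int("") ValueError input is outside Pre_,
-- where this returns junk 0)
def pvIntJoin (number : List Char) : Int :=
  number.foldl (fun a ch => a * 10 + ((ch.toNat : Int) - 48)) 0

-- `while data[row][c].isdigit() and c >= 0: number.insert(0, data[row][c]); c -= 1`
-- (fuel only makes the recursion structural; it is never exhausted at the call below)
def gwLeftF : Nat → List Char → Int → List Char → List Char
  | 0, _, _, number => number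
  | fuel + 1, s, c, number =>
    if (((PySem.List.pyGet? s c).map Char.isDigit).getD false = true) ∧ 0 ≤ c then
      gwLeftF fuel s (c - 1) ((PySem.List.pyGet? s c).getD ' ' :: number)
    else number

def gwLeft (s : List Char) (c : Int) (number : List Char) : List Char :=
  gwLeftF ((c + 1).toNat + 1) s c number

-- `while c < len(data[row]) and data[row][c].isdigit(): number.append(data[row][c]); c += 1`
def gwRightF : Nat → List Char → Int → List Char → List Char
  | 0, _, _, number => number
  | fuel + 1, s, c, number =>
    if c < (s.length : Int) ∧ (((PySem.List.pyGet? s c).map Char.isDigit).getD false = true) then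
      gwRightF fuel s (c + 1) (number ++ [(PySem.List.pyGet? s c).getD ' '])
    else number

def gwRight (s : List Char) (c : Int) (number : List Char) : List Char :=
  gwRightF (((s.length : Int) - c).toNat + 1) s c number

def get_whole_number (data : List String) (row col : Int) : Int :=
  pvIntJoin (gwRight (pvRowChars data row) (col + 1) (gwLeft (pvRowChars data row) col []))

-- the for-loop over the four constant DIRS, unrolled in the same order
def adjacent_part_number_upl (data : List String) (row : Int) (col : Int) : Int :=
  if (pvDigitProbe data (row - 1) (col - 1)).getD false = true then
    get_whole_number data (row - 1) (col - 1)
  else if (pvDigitProbe data row (col - 1)).getD false = true then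
    get_whole_number data row (col - 1)
  else if (pvDigitProbe data (row - 1) col).getD false = true then
    get_whole_number data (row - 1) col
  else if (pvDigitProbe data (row - 1) (col + 1)).getD false = true then
    get_whole_number data (row - 1) (col + 1)
  else 0

-- ===== PORT B =====

-- one forward pass over the row (`for i, x in enumerate(s)`): every maximal digit run
-- as (start, end, value), the value accumulated as val*10 + (ord(x)-48)
def bRunsAux : List Char → Nat → Option (Nat × Int) → List (Nat × Nat × Int) → List (Nat × Nat × Int)
  | [], i, st?, runs =>
    match st? with
    | some (st, v) => runs ++ [(st, i, v)]
    | none => runs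
  | x :: t, i, st?, runs =>
    if x.isDigit = true then
      match st? with
      | none => bRunsAux t (i + 1) (some (i, (x.toNat : Int) - 48)) runs
      | some (st, v) => bRunsAux t (i + 1) (some (st, v * 10 + ((x.toNat : Int) - 48))) runs
    else
      match st? with
      | some (st, v) => bRunsAux t (i + 1) none (runs ++ [(st, i, v)])
      | none => bRunsAux t (i + 1) none runs

-- `next(v for st, en, v in runs if st <= c < en)` (none = StopIteration, outside Pre_)
def bPick : List (Nat × Nat × Int) → Int → Option Int
  | [], _ => none
  | (st, en, v) :: rest, c => if (st : Int) ≤ c ∧ c < (en : Int) then some v else bPick rest c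

def bProbeValue (data : List String) (r c : Int) : Int :=
  (bPick (bRunsAux (pvRowChars data r) 0 none []) c).getD 0

-- the same four-probe cascade B's Python loop performs
def adjacent_part_number_upl_alt (data : List String) (row : Int) (col : Int) : Int :=
  if (pvDigitProbe data (row - 1) (col - 1)).getD false = true then
    bProbeValue data (row - 1) (col - 1)
  else if (pvDigitProbe data row (col - 1)).getD false = true then
    bProbeValue data row (col - 1)
  else if (pvDigitProbe data (row - 1) col).getD false = true then
    bProbeValue data (row - 1) col
  else if (pvDigitProbe data (row - 1) (col + 1)).getD false = true then
    bProbeValue data (row - 1) (col + 1)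
  else 0

-- ===== PRECONDITION & SPEC =====

-- Pre_ requires every probe read up to the first digit hit to be in range (else A raises
-- IndexError) and, if a probe hits, the probed column to be non-negative: a hit at a negative
-- (Python-wrapped) column probes a cell outside the intended grid, where A either raises
-- ValueError on int("") or returns an accidental wraparound concatenation of unrelated digit
-- chars that no caller could rely on (and B raises StopIteration) — both are excluded.
def Pre_adjacent_part_number_upl (data : List String) (row : Int) (col : Int) : Prop :=
  pvDigitProbe data (row - 1) (col - 1) ≠ none ∧
  (pvDigitProbe data (row - 1) (col - 1) = some true → 0 ≤ col - 1) ∧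
  (pvDigitProbe data (row - 1) (col - 1) = some false →
    (pvDigitProbe data row (col - 1) ≠ none ∧
     (pvDigitProbe data row (col - 1) = some true → 0 ≤ col - 1) ∧
     (pvDigitProbe data row (col - 1) = some false →
       (pvDigitProbe data (row - 1) col ≠ none ∧
        (pvDigitProbe data (row - 1) col = some true → 0 ≤ col) ∧
        (pvDigitProbe data (row - 1) col = some false →
          (pvDigitProbe data (row - 1) (col + 1) ≠ none ∧
           (pvDigitProbe data (row - 1) (col + 1) = some true → 0 ≤ col + 1)))))))

instance (data : List String) (row : Int) (col : Int) : Decidable (Pre_adjacent_part_number_upl data row col) := by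
  unfold Pre_adjacent_part_number_upl; infer_instance

def pvWitness_adjacent_part_number_upl : List String × Int × Int := (["5.", ".*"], 1, 1)

def Spec_adjacent_part_number_upl (data : List String) (row : Int) (col : Int) (out : Int) : Prop := out = adjacent_part_number_upl_alt data row col
instance (data : List String) (row : Int) (col : Int) (out : Int) : Decidable (Spec_adjacent_part_number_upl data row col out) := by unfold Spec_adjacent_part_number_upl; infer_instance

-- ===== CLAIM (what is proved, stated in full; the proofs are below) =====
def Claim_equal_adjacent_part_number_upl : Prop := ∀ (data : List String) (row : Int) (col : Int), Dom_adjacent_part_number_upl data row col → Pre_adjacent_part_number_upl data row col → Spec_adjacent_part_number_upl data row col (adjacent_part_number_upl data row col)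

-- ===== LEMMAS AND PROOFS =====

-- the maximal digit run around position n, split at n: chars [run-start..n] and (n..run-end)
def pvRunL (s : List Char) (n : Nat) : List Char :=
  (((s.take (n + 1)).reverse).takeWhile Char.isDigit).reverse
def pvRunR (s : List Char) (n : Nat) : List Char :=
  (s.drop (n + 1)).takeWhile Char.isDigit
def pvPush (v : Int) (ds : List Char) : Int :=
  ds.foldl (fun a ch => a * 10 + ((ch.toNat : Int) - 48)) v

theorem pvRevTake (s : List Char) (n : Nat) (hn : n < s.length) :
    (s.take (n + 1)).reverse = s[n] :: (s.take n).reverse := by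
  rw [List.take_add_one]
  simp [List.getElem?_eq_getElem hn]

theorem pvTakeAppLe {α : Type} (a b : List α) (n : Nat) (h : n ≤ a.length) :
    (a ++ b).take n = a.take n := by
  induction a generalizing n with
  | nil => simp at h; subst h; simp
  | cons x t ih =>
    cases n with
    | zero => simp
    | succ m => simp only [List.cons_append, List.take_succ_cons]; rw [ih m (by simpa using h)]

theorem pvDropAppLe {α : Type} (a b : List α) (n : Nat) (h : n ≤ a.length) :
    (a ++ b).drop n = a.drop n ++ b := by
  induction a generalizing n with
  | nil => simp at h; subst h; simp
  | cons x t ih =>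
    cases n with
    | zero => simp
    | succ m => simp only [List.cons_append, List.drop_succ_cons]; rw [ih m (by simpa using h)]

theorem pvTakeApp {α : Type} (a b : List α) (k : Nat) :
    (a ++ b).take (a.length + k) = a ++ b.take k := by
  induction a with
  | nil => simp
  | cons x t ih => simp [List.take_succ_cons, Nat.succ_add, ih]

theorem pvDropApp {α : Type} (a b : List α) (k : Nat) :
    (a ++ b).drop (a.length + k) = b.drop k := by
  induction a with
  | nil => simp
  | cons x t ih => simp [List.drop_succ_cons, Nat.succ_add, ih]

theorem pvTWAll {α : Type} (p : α → Bool) (l : List α) (h : ∀ x ∈ l, p x = true) :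
    l.takeWhile p = l := by
  induction l with
  | nil => rfl
  | cons x t ih =>
    rw [List.takeWhile_cons, if_pos (h x (by simp))]
    rw [ih (fun y hy => h y (by simp [hy]))]

theorem pvTW1 {α : Type} (p : α → Bool) (a b : List α) (h : ∀ x ∈ a, p x = true) :
    (a ++ b).takeWhile p = a ++ b.takeWhile p := by
  induction a with
  | nil => simp
  | cons x t ih =>
    rw [List.cons_append, List.takeWhile_cons, if_pos (h x (by simp))]
    rw [ih (fun y hy => h y (by simp [hy]))]
    rfl

theorem pvTW3 {α : Type} (p : α → Bool) (a b : List α) (x : α) (hx : p x = false) :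
    (a ++ x :: b).takeWhile p = a.takeWhile p := by
  induction a with
  | nil => simp [hx]
  | cons y t ih =>
    rw [List.cons_append, List.takeWhile_cons, List.takeWhile_cons]
    by_cases hy : p y = true
    · rw [if_pos hy, if_pos hy, ih]
    · rw [if_neg hy, if_neg hy]

theorem pvDWTW {α : Type} (p : α → Bool) (l : List α) :
    (l.dropWhile p).takeWhile p = [] := by
  induction l with
  | nil => rfl
  | cons x t ih =>
    rw [List.dropWhile_cons]
    by_cases hx : p x = true
    · rw [if_pos hx]; exact ih
    · rw [if_neg hx, List.takeWhile_cons, if_neg hx]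

theorem pvDWHEAD {α : Type} (p : α → Bool) (l r : List α) (x : α)
    (h : l.dropWhile p = x :: r) : p x = false := by
  induction l with
  | nil => simp at h
  | cons y t ih =>
    rw [List.dropWhile_cons] at h
    by_cases hy : p y = true
    · rw [if_pos hy] at h; exact ih h
    · rw [if_neg hy] at h
      cases h
      simpa using hy

-- the left while-loop collects the digit chars from the run start up to position n
theorem pvGwLeftF (s : List Char) : ∀ (n : Nat), n < s.length → ∀ acc,
    gwLeftF (n + 2) s (n : Int) acc = pvRunL s n ++ acc := by
  intro n
  induction n with
  | zero =>
    intro hn acc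
    have hget : PySem.List.pyGet? s ((0 : Nat) : Int) = some s[0] := by
      rw [PySem.List.pyGet?_natCast]; exact List.getElem?_eq_getElem hn
    by_cases hd : s[0].isDigit = true
    · show gwLeftF 2 s ((0 : Nat) : Int) acc = _
      rw [gwLeftF, if_pos ⟨by rw [hget]; simpa using hd, by omega⟩]
      rw [hget]
      simp only [Option.getD_some]
      rw [show ((0 : Nat) : Int) - 1 = -1 by simp]
      rw [gwLeftF, if_neg (by intro h; exact absurd h.2 (by omega))]
      simp [pvRunL, pvRevTake s 0 hn, hd]
    · rw [Bool.not_eq_true] at hd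
      show gwLeftF 2 s ((0 : Nat) : Int) acc = _
      rw [gwLeftF, if_neg (by intro hcon; rw [hget] at hcon; simp [hd] at hcon)]
      simp [pvRunL, pvRevTake s 0 hn, hd]
  | succ m ih =>
    intro hn acc
    have hget : PySem.List.pyGet? s ((m + 1 : Nat) : Int) = some s[m + 1] := by
      rw [PySem.List.pyGet?_natCast]; exact List.getElem?_eq_getElem hn
    by_cases hd : s[m + 1].isDigit = true
    · show gwLeftF (m + 3) s ((m + 1 : Nat) : Int) acc = _
      rw [gwLeftF, if_pos ⟨by rw [hget]; simpa using hd, by positivity⟩]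
      rw [hget]
      simp only [Option.getD_some]
      rw [show ((m + 1 : Nat) : Int) - 1 = ((m : Nat) : Int) by push_cast; ring]
      rw [ih (by omega)]
      have h2 : pvRunL s (m + 1) = pvRunL s m ++ [s[m + 1]] := by
        simp [pvRunL, pvRevTake s (m + 1) hn, hd]
      rw [h2]
      simp
    · rw [Bool.not_eq_true] at hd
      show gwLeftF (m + 3) s ((m + 1 : Nat) : Int) acc = _
      rw [gwLeftF, if_neg (by intro hcon; rw [hget] at hcon; simp [hd] at hcon)]
      simp [pvRunL, pvRevTake s (m + 1) hn, hd]

theorem pvGwLeft (s : List Char) (n : Nat) (hn : n < s.length) (acc : List Char) :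
    gwLeft s (n : Int) acc = pvRunL s n ++ acc := by
  have h : (((n : Nat) : Int) + 1).toNat + 1 = n + 2 := by omega
  rw [gwLeft, h, pvGwLeftF s n hn acc]

-- the right while-loop collects the digit chars from position m onward
theorem pvGwRightF (s : List Char) : ∀ (k : Nat) (m : Int) (acc : List Char), 0 ≤ m →
    ((s.length : Int) - m).toNat = k →
    gwRightF (k + 1) s m acc = acc ++ (s.drop m.toNat).takeWhile Char.isDigit := by
  intro k
  induction k with
  | zero =>
    intro m acc hm hk
    rw [gwRightF, if_neg (by intro h; exact absurd h.1 (by omega))]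
    rw [List.drop_eq_nil_of_le (by omega)]
    simp
  | succ k ih =>
    intro m acc hm hk
    have hmlt : m < (s.length : Int) := by omega
    have hnt : m.toNat < s.length := by omega
    have hget : PySem.List.pyGet? s m = some s[m.toNat] := by
      conv_lhs => rw [show m = ((m.toNat : Nat) : Int) by omega]
      rw [PySem.List.pyGet?_natCast]
      exact List.getElem?_eq_getElem hnt
    have hdrop : s.drop m.toNat = s[m.toNat] :: s.drop (m.toNat + 1) :=
      List.drop_eq_getElem_cons hnt
    by_cases hd : s[m.toNat].isDigit = true
    · rw [gwRightF, if_pos ⟨hmlt, by rw [hget]; simpa using hd⟩]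
      rw [hget]
      simp only [Option.getD_some]
      rw [ih (m + 1) (acc ++ [s[m.toNat]]) (by omega) (by omega)]
      rw [show (m + 1).toNat = m.toNat + 1 by omega]
      rw [hdrop, List.takeWhile_cons, if_pos hd]
      simp
    · rw [Bool.not_eq_true] at hd
      rw [gwRightF, if_neg (by intro hcon; rw [hget] at hcon; simp [hd] at hcon)]
      rw [hdrop, List.takeWhile_cons, if_neg (by simp [hd])]
      simp

theorem pvGwRight (s : List Char) (m : Int) (hm : 0 ≤ m) (acc : List Char) :
    gwRight s m acc = acc ++ (s.drop m.toNat).takeWhile Char.isDigit := by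
  rw [gwRight, pvGwRightF s (((s.length : Int) - m).toNat) m acc hm rfl]

-- the run accumulator only ever appends
theorem pvRunsAcc : ∀ (t : List Char) (i : Nat) (st? : Option (Nat × Int))
    (rs : List (Nat × Nat × Int)), bRunsAux t i st? rs = rs ++ bRunsAux t i st? [] := by
  intro t
  induction t with
  | nil =>
    intro i st? rs
    cases st? with
    | none => simp [bRunsAux]
    | some p => cases p; simp [bRunsAux]
  | cons x t ih =>
    intro i st? rs
    by_cases hx : x.isDigit = true
    · cases st? with
      | none => simp only [bRunsAux, hx, reduceIte]; rw [ih]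
      | some p =>
        cases p with
        | mk st v => simp only [bRunsAux, hx, reduceIte]; rw [ih]
    · cases st? with
      | none =>
        rw [show bRunsAux (x :: t) i none rs = bRunsAux t (i + 1) none rs from by
          simp [bRunsAux, hx]]
        rw [show bRunsAux (x :: t) i none [] = bRunsAux t (i + 1) none [] from by
          simp [bRunsAux, hx]]
        exact ih (i + 1) none rs
      | some p =>
        cases p with
        | mk st v =>
          rw [show bRunsAux (x :: t) i (some (st, v)) rs
              = bRunsAux t (i + 1) none (rs ++ [(st, i, v)]) from by simp [bRunsAux, hx]]
          rw [show bRunsAux (x :: t) i (some (st, v)) []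
              = bRunsAux t (i + 1) none [(st, i, v)] from by simp [bRunsAux, hx]]
          rw [ih (i + 1) none (rs ++ [(st, i, v)]), ih (i + 1) none [(st, i, v)]]
          simp

-- consuming an open run: it closes at the end of the digit prefix
theorem pvRunsOpen : ∀ (t : List Char) (i st : Nat) (v : Int),
    bRunsAux t i (some (st, v)) [] =
      (st, i + (t.takeWhile Char.isDigit).length, pvPush v (t.takeWhile Char.isDigit)) ::
        bRunsAux (t.dropWhile Char.isDigit) (i + (t.takeWhile Char.isDigit).length) none [] := by
  intro t
  induction t with
  | nil => intro i st v; simp [bRunsAux, pvPush]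
  | cons x t ih =>
    intro i st v
    by_cases hx : x.isDigit = true
    · simp only [bRunsAux, hx, reduceIte, List.takeWhile_cons, List.dropWhile_cons,
        List.length_cons]
      rw [ih]
      rw [show i + 1 + (t.takeWhile Char.isDigit).length
          = i + ((t.takeWhile Char.isDigit).length + 1) by omega]
      rw [show pvPush (v * 10 + ((x.toNat : Int) - 48)) (t.takeWhile Char.isDigit)
          = pvPush v (x :: t.takeWhile Char.isDigit) by simp [pvPush]]
    · have e1 : (x :: t).takeWhile Char.isDigit = [] := by simp [hx]
      have e2 : (x :: t).dropWhile Char.isDigit = x :: t := by simp [hx]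
      rw [e1, e2]
      rw [show bRunsAux (x :: t) i (some (st, v)) []
          = bRunsAux t (i + 1) none [(st, i, v)] from by simp [bRunsAux, hx]]
      rw [pvRunsAcc]
      rw [show bRunsAux (x :: t) (i + List.length ([] : List Char)) none []
          = bRunsAux t (i + 1) none [] from by simp [bRunsAux, hx]]
      simp [pvPush]

-- shifting past a non-digit char: the run around a later position is unchanged
theorem pvRunShift (ds rest' : List Char) (x : Char) (hx : x.isDigit = false) (n' : Nat) :
    pvRunL (ds ++ x :: rest') (ds.length + 1 + n') = pvRunL rest' n'
    ∧ pvRunR (ds ++ x :: rest') (ds.length + 1 + n') = pvRunR rest' n' := by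
  constructor
  · unfold pvRunL
    rw [show ds.length + 1 + n' + 1 = ds.length + (n' + 2) by omega]
    rw [pvTakeApp]
    rw [show (x :: rest').take (n' + 2) = x :: rest'.take (n' + 1) by simp]
    rw [show (ds ++ x :: rest'.take (n' + 1)).reverse
        = (rest'.take (n' + 1)).reverse ++ x :: ds.reverse by simp]
    rw [pvTW3 _ _ _ _ hx]
  · unfold pvRunR
    rw [show ds.length + 1 + n' + 1 = ds.length + (n' + 2) by omega]
    rw [pvDropApp]
    simp

-- inside the leading digit run, left+right scans reconstruct exactly that run
theorem pvInRun (s ds : List Char) (hds : s.takeWhile Char.isDigit = ds) (n : Nat)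
    (hn : n < ds.length) : pvRunL s n ++ pvRunR s n = ds := by
  have hall : ∀ x ∈ ds, x.isDigit = true := by
    intro x hx; exact List.mem_takeWhile_imp (hds ▸ hx)
  have hsplit : ds ++ s.dropWhile Char.isDigit = s := by
    rw [← hds]; exact List.takeWhile_append_dropWhile
  have hL : pvRunL s n = ds.take (n + 1) := by
    unfold pvRunL
    rw [← hsplit, pvTakeAppLe _ _ _ (by omega)]
    rw [pvTWAll _ _ (by
      intro y hy
      exact hall y (List.mem_of_mem_take (List.mem_reverse.mp hy)))]
    simp
  have hR : pvRunR s n = ds.drop (n + 1) := by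
    unfold pvRunR
    rw [← hsplit, pvDropAppLe _ _ _ (by omega)]
    rw [pvTW1 _ _ _ (fun y hy => hall y (List.mem_of_mem_drop hy)), pvDWTW]
    simp
  rw [hL, hR, List.take_append_drop]

-- main B lemma: picking from the one-pass run list returns the run around position n
theorem pvMainB : ∀ (L : Nat) (s : List Char), s.length ≤ L → ∀ (n i : Nat),
    ∀ (hn : n < s.length), s[n].isDigit = true →
    bPick (bRunsAux s i none []) ((i : Int) + (n : Int))
      = some (pvPush 0 (pvRunL s n ++ pvRunR s n)) := by
  intro L
  induction L with
  | zero => intro s hs n i hn; omega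
  | succ L ih =>
    intro s hs n i hn hd
    cases hds : s.takeWhile Char.isDigit with
    | nil =>
      cases s with
      | nil => simp at hn
      | cons x t =>
        have hx : x.isDigit = false := by
          by_contra h
          rw [List.takeWhile_cons, if_pos (by simpa using h)] at hds
          simp at hds
        have hn0 : n ≠ 0 := by
          intro h; subst h; simp at hd; rw [hd] at hx; simp at hx
        obtain ⟨n', rfl⟩ : ∃ n', n = n' + 1 := ⟨n - 1, by omega⟩
        rw [show bRunsAux (x :: t) i none [] = bRunsAux t (i + 1) none [] by
          simp [bRunsAux, hx]]
        rw [show ((i : Nat) : Int) + ((n' + 1 : Nat) : Int)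
            = ((i + 1 : Nat) : Int) + ((n' : Nat) : Int) by push_cast; ring]
        have hn' : n' < t.length := by simpa using hn
        have hd' : t[n'].isDigit = true := by simpa using hd
        rw [ih t (by simpa using hs) n' (i + 1) hn' hd']
        have hsh := pvRunShift [] t x hx n'
        simp only [List.nil_append, List.length_nil, Nat.zero_add, Nat.add_comm 1 n'] at hsh
        rw [hsh.1, hsh.2]
    | cons d0 ds' =>
      cases s with
      | nil => simp at hds
      | cons y t =>
        have hyd : y.isDigit = true := by
          by_contra h
          rw [List.takeWhile_cons, if_neg (by simpa using h)] at hds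
          simp at hds
        rw [List.takeWhile_cons, if_pos hyd] at hds
        have hy : y = d0 := (List.cons.injEq _ _ _ _ ▸ hds).1
        have ht : t.takeWhile Char.isDigit = ds' := (List.cons.injEq _ _ _ _ ▸ hds).2
        subst hy
        have hrun : bRunsAux (y :: t) i none []
            = (i, i + (1 + ds'.length), pvPush 0 (y :: ds')) ::
                bRunsAux (t.dropWhile Char.isDigit) (i + (1 + ds'.length)) none [] := by
          simp only [bRunsAux, hyd, reduceIte]
          rw [pvRunsOpen, ht]
          rw [show i + 1 + ds'.length = i + (1 + ds'.length) by omega]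
          rw [show pvPush ((y.toNat : Int) - 48) ds' = pvPush 0 (y :: ds') by simp [pvPush]]
        rw [hrun]
        have htsplit : ds' ++ t.dropWhile Char.isDigit = t := by
          rw [← ht]; exact List.takeWhile_append_dropWhile
        by_cases hcase : n < ds'.length + 1
        · rw [bPick, if_pos ⟨by omega, by push_cast; omega⟩]
          have hds2 : (y :: t).takeWhile Char.isDigit = y :: ds' := by
            rw [List.takeWhile_cons, if_pos hyd, ht]
          rw [pvInRun (y :: t) (y :: ds') hds2 n (by simpa using hcase)]
        · rw [bPick, if_neg (by push_cast; omega)]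
          cases hrest : t.dropWhile Char.isDigit with
          | nil =>
            exfalso
            have : t.length = ds'.length := by
              conv_lhs => rw [← htsplit]
              rw [hrest]; simp
            simp only [List.length_cons, this] at hn
            omega
          | cons x rest' =>
            have hx : x.isDigit = false := pvDWHEAD Char.isDigit t rest' x hrest
            have ht2 : t = ds' ++ x :: rest' := by rw [← htsplit, hrest]
            have hs2 : y :: t = (y :: ds') ++ x :: rest' := by rw [ht2]; rfl
            have hlen : t.length = ds'.length + 1 + rest'.length := by
              rw [ht2]; simp; omega
            have hneq : n ≠ ds'.length + 1 := by
              intro h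
              have hx2 : (y :: t)[n]? = some x := by
                rw [hs2]
                rw [List.getElem?_append_right (by simp; omega)]
                simp only [List.length_cons]
                rw [show n - (ds'.length + 1) = 0 by omega]
                simp
              rw [List.getElem?_eq_getElem hn] at hx2
              rw [Option.some_inj.mp hx2] at hd
              rw [hd] at hx
              simp at hx
            obtain ⟨n', hn'eq⟩ : ∃ n', n = ds'.length + 1 + 1 + n' :=
              ⟨n - ds'.length - 2, by omega⟩
            rw [show bRunsAux (x :: rest') (i + (1 + ds'.length)) none []
                = bRunsAux rest' (i + (1 + ds'.length) + 1) none [] by simp [bRunsAux, hx]]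
            have hn' : n' < rest'.length := by
              simp only [List.length_cons, hlen] at hn; omega
            have hd' : rest'[n'].isDigit = true := by
              have e : (y :: t)[n]? = rest'[n']? := by
                rw [hs2]
                rw [List.getElem?_append_right (by simp; omega)]
                simp only [List.length_cons]
                rw [show n - (ds'.length + 1) = n' + 1 by omega]
                simp
              rw [List.getElem?_eq_getElem hn, List.getElem?_eq_getElem hn'] at e
              rw [← Option.some_inj.mp e]; exact hd
            rw [show ((i : Nat) : Int) + ((n : Nat) : Int)
                = ((i + (1 + ds'.length) + 1 : Nat) : Int) + ((n' : Nat) : Int) by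
              push_cast; omega]
            rw [ih rest' (by
              have hsl : (y :: t).length ≤ L + 1 := hs
              simp only [List.length_cons, hlen] at hsl
              omega) n' (i + (1 + ds'.length) + 1) hn' hd']
            have hsh := pvRunShift (y :: ds') rest' x hx n'
            rw [show n = (y :: ds').length + 1 + n' by simp only [List.length_cons]; omega]
            rw [hs2, hsh.1, hsh.2]

theorem pvJoinPush (l : List Char) : pvIntJoin l = pvPush 0 l := rfl

-- the extraction agreement at a digit hit at a non-negative probed column
theorem pvCore (data : List String) (r c : Int) (hp : pvDigitProbe data r c = some true)
    (hc : 0 ≤ c) : get_whole_number data r c = bProbeValue data r c := by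
  unfold pvDigitProbe at hp
  cases hrow : PySem.List.pyGet? data r with
  | none => rw [hrow] at hp; simp at hp
  | some str =>
    rw [hrow] at hp
    have hp2 : (PySem.List.pyGet? str.toList c).map Char.isDigit = some true := hp
    cases hch : PySem.List.pyGet? str.toList c with
    | none => rw [hch] at hp2; simp at hp2
    | some ch =>
      rw [hch] at hp2
      simp only [Option.map_some, Option.some.injEq] at hp2
      have hrowc : pvRowChars data r = str.toList := by simp [pvRowChars, hrow]
      have hin : -(str.toList.length : Int) ≤ c ∧ c < (str.toList.length : Int) := by
        have hne : ¬ PySem.List.pyGet? str.toList c = none := by rw [hch]; simp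
        have hir := not_not.mp (fun h => hne ((PySem.List.pyGet?_eq_none_iff _ _).mpr h))
        simpa [PySem.Raise.InRange] using hir
      have hlt : c.toNat < str.toList.length := by omega
      have hgetn : str.toList[c.toNat] = ch := by
        have hch2 := hch
        conv_lhs at hch2 => rw [show c = ((c.toNat : Nat) : Int) by omega]
        rw [PySem.List.pyGet?_natCast, List.getElem?_eq_getElem hlt] at hch2
        exact Option.some.injEq _ _ ▸ hch2
      have hdig : str.toList[c.toNat].isDigit = true := by rw [hgetn, hp2]
      unfold get_whole_number bProbeValue
      rw [hrowc]
      rw [show c = ((c.toNat : Nat) : Int) by omega]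
      rw [pvGwLeft str.toList c.toNat hlt []]
      rw [pvGwRight str.toList (((c.toNat : Nat) : Int) + 1) (by positivity)]
      rw [show ((((c.toNat : Nat) : Int)) + 1).toNat = c.toNat + 1 by omega]
      have hmb := pvMainB str.toList.length str.toList le_rfl c.toNat 0 hlt hdig
      rw [show ((0 : Nat) : Int) + ((c.toNat : Nat) : Int) = ((c.toNat : Nat) : Int) by simp]
        at hmb
      rw [hmb]
      rw [Option.getD_some, pvJoinPush]
      simp [pvRunL, pvRunR]

-- ===== VERDICT (by name: the statement is the Claim_ definition above) =====
theorem adjacent_part_number_upl_spec : Claim_equal_adjacent_part_number_upl := by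
  intro data row col _ hpre
  unfold Spec_adjacent_part_number_upl
  obtain ⟨h1n, h1t, h1f⟩ := hpre
  unfold adjacent_part_number_upl adjacent_part_number_upl_alt
  cases hp1 : pvDigitProbe data (row - 1) (col - 1) with
  | none => exact absurd hp1 h1n
  | some b1 =>
    cases b1 with
    | true =>
      simp only [Option.getD_some, reduceIte]
      exact pvCore data _ _ hp1 (h1t hp1)
    | false =>
      simp only [Option.getD_some, Bool.false_eq_true, reduceIte]
      obtain ⟨h2n, h2t, h2f⟩ := h1f hp1
      cases hp2 : pvDigitProbe data row (col - 1) with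
      | none => exact absurd hp2 h2n
      | some b2 =>
        cases b2 with
        | true =>
          simp only [Option.getD_some, reduceIte]
          exact pvCore data _ _ hp2 (h2t hp2)
        | false =>
          simp only [Option.getD_some, Bool.false_eq_true, reduceIte]
          obtain ⟨h3n, h3t, h3f⟩ := h2f hp2
          cases hp3 : pvDigitProbe data (row - 1) col with
          | none => exact absurd hp3 h3n
          | some b3 =>
            cases b3 with
            | true =>
              simp only [Option.getD_some, reduceIte]
              exact pvCore data _ _ hp3 (h3t hp3)
            | false =>
              simp only [Option.getD_some, Bool.false_eq_true, reduceIte]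
              obtain ⟨h4n, h4t⟩ := h3f hp3
              cases hp4 : pvDigitProbe data (row - 1) (col + 1) with
              | none => exact absurd hp4 h4n
              | some b4 =>
                cases b4 with
                | true =>
                  simp only [Option.getD_some, reduceIte]
                  exact pvCore data _ _ hp4 (h4t hp4)
                | false =>
                  simp only [Option.getD_some, Bool.false_eq_true, reduceIte]
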